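-- pv_equiv track=rewrite | github.com/kwhippo/impracticalProjects | cypher/homophonic.py | calculate_alpha_text_key
-- ===== SOURCE A (Python) =====
-- def calculate_alpha_text_key(alpha_dict_key):
--     # Find longest length
--     alpha_text_key = ''
--     longest = 0
--     for value in alpha_dict_key.values():
--         if len(value) > longest:
--             longest = len(value)
--     for i in range(longest):
--         for value in alpha_dict_key.values():
--             try:
--                 alpha_text_key += value[i]
--             except IndexError:
--                 alpha_text_key += ' '
--         alpha_text_key += '\n'
--     return alpha_text_key
-- ===== SOURCE B (Python) =====
-- def calculate_alpha_text_key(alpha_dict_key):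
--     vals = list(alpha_dict_key.values())
--     longest = max(map(len, vals), default=0)
--     grid = [[' '] * len(vals) for _ in range(longest)]
--     for j, v in enumerate(vals):
--         for i, ch in enumerate(v):
--             grid[i][j] = ch
--     return ''.join(''.join(row) + '\n' for row in grid)
-- ===== Notes on version B (the rewrite author's own statement) =====
-- stated objective: alternative
-- what changed: Instead of gathering each output row by indexing every value with try/except padding, B preallocates a longest-by-n grid of spaces and scatters each value's characters into its column (value-major writes instead of row-major reads), then joins the rows.
import Mathlib
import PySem

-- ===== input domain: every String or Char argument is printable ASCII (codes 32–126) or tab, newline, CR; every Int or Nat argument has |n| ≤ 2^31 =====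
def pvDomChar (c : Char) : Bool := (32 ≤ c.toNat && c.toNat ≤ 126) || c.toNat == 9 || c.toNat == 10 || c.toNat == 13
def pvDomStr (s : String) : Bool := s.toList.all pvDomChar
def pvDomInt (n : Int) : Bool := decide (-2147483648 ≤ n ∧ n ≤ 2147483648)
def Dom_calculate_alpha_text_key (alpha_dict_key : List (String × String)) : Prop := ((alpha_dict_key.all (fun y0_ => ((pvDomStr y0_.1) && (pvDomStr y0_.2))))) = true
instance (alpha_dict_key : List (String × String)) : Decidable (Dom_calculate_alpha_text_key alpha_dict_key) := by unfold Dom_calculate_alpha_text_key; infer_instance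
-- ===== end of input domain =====

-- B replaces A's row-major gather (index every value per output row, try/except padding)
-- by a scatter: preallocate a longest-by-n grid of spaces, write each value down its own
-- column, then join the rows (objective: alternative — value-major writes vs row-major reads).

-- ===== PORT A =====
-- string accumulation is ported on List Char (Lean's String.append is kernel-opaque);
-- .values() of the assoc-list dict is the list of second components;
-- 'try: ... value[i] except IndexError: " "' is (PySem.List.pyGet? value i).getD ' '
def calculate_alpha_text_key (alpha_dict_key : List (String × String)) : String :=
  let vals := alpha_dict_key.map (fun p => p.2.toList)
  let longest : Int := vals.foldl (fun l v => if (v.length : Int) > l then (v.length : Int) else l) 0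
  String.ofList ((PySem.List.pyRange 0 longest 1).foldl (fun acc i =>
    (vals.foldl (fun acc v => acc ++ [(PySem.List.pyGet? v i).getD ' ']) acc) ++ ['\n']) [])

-- ===== PORT B =====
-- 'for i, ch in enumerate(v): grid[i][j] = ch' — scatter one value down column j
def scatterCol (j : Nat) (g : List (List Char)) (v : List Char) : List (List Char) :=
  v.zipIdx.foldl (fun g p => g.modify p.2 (fun row => row.set j p.1)) g

def calculate_alpha_text_key_alt (alpha_dict_key : List (String × String)) : String :=
  let vals := alpha_dict_key.map (fun p => p.2.toList)
  let longest : Nat := vals.foldl (fun m v => max m v.length) 0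
  let grid0 := List.replicate longest (List.replicate vals.length ' ')
  let grid := vals.zipIdx.foldl (fun g p => scatterCol p.2 g p.1) grid0
  String.ofList ((grid.map (fun row => row ++ ['\n'])).flatten)

-- ===== PRECONDITION & SPEC =====
def Spec_calculate_alpha_text_key (alpha_dict_key : List (String × String)) (out : String) : Prop := out = calculate_alpha_text_key_alt alpha_dict_key
instance (alpha_dict_key : List (String × String)) (out : String) : Decidable (Spec_calculate_alpha_text_key alpha_dict_key out) := by unfold Spec_calculate_alpha_text_key; infer_instance

-- ===== CLAIM (what is proved, stated in full; the proofs are below) =====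
def Claim_equal_calculate_alpha_text_key : Prop := ∀ (alpha_dict_key : List (String × String)), Dom_calculate_alpha_text_key alpha_dict_key → Spec_calculate_alpha_text_key alpha_dict_key (calculate_alpha_text_key alpha_dict_key)

-- ===== LEMMAS AND PROOFS =====

-- A's Int running max equals B's Nat running max
theorem fold_longest_eq (vals : List (List Char)) (m : Nat) :
    vals.foldl (fun l v => if (v.length : Int) > l then (v.length : Int) else l) (m : Int)
      = ((vals.foldl (fun m v => max m v.length) m : Nat) : Int) := by
  induction vals generalizing m with
  | nil => rfl
  | cons a t ih =>
      simp only [List.foldl_cons]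
      rcases Nat.lt_or_ge m a.length with h | h
      · rw [if_pos (by exact_mod_cast h), Nat.max_eq_right h.le, ih]
      · rw [if_neg (by exact_mod_cast Nat.not_lt.mpr h), Nat.max_eq_left h, ih]

-- A's outer loop builds the flatMap of its rows
theorem foldl_rows_eq (vals : List (List Char)) (l : List Int) (acc : List Char) :
    l.foldl (fun acc i =>
        (vals.foldl (fun acc v => acc ++ [(PySem.List.pyGet? v i).getD ' ']) acc) ++ ['\n']) acc
      = acc ++ l.flatMap (fun i => vals.map (fun v => (PySem.List.pyGet? v i).getD ' ') ++ ['\n']) := by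
  induction l generalizing acc with
  | nil => simp
  | cons i t ih =>
      simp only [List.foldl_cons, List.flatMap_cons]
      rw [ih, PySem.List.foldl_append_singleton_eq_map]
      simp [List.append_assoc]


theorem scatterCol_getElem? (j : Nat) (v : List Char) : ∀ (k : Nat) (g : List (List Char)) (i : Nat),
    ((v.zipIdx k).foldl (fun g p => g.modify p.2 (fun row => row.set j p.1)) g)[i]?
      = if k ≤ i ∧ i < k + v.length then g[i]?.map (fun row => row.set j (v.getD (i - k) ' ')) else g[i]? := by
  induction v with
  | nil =>
      intro k g i
      rw [if_neg (by simp only [List.length_nil]; omega)]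
      rfl
  | cons c cs ih =>
      intro k g i
      rw [List.zipIdx_cons, List.foldl_cons, ih]
      by_cases hik : i = k
      · subst hik
        rw [if_neg (by omega), List.getElem?_modify,
          if_pos ⟨le_rfl, Nat.lt_add_of_pos_right (by simp)⟩]
        simp
      · have hki : k ≠ i := fun h => hik h.symm
        simp only [List.getElem?_modify]
        have hmod : ((fun a => if k = i then a.set j c else a) <$> g[i]?) = g[i]? := by
          cases g[i]? <;> simp [hki]
        rw [hmod]
        by_cases hin : k ≤ i ∧ i < k + (c :: cs).length
        · rw [if_pos (by simp only [List.length_cons] at hin ⊢; omega), if_pos hin]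
          have hsub : i - k = (i - (k + 1)) + 1 := by omega
          rw [hsub]
          simp
        · rw [if_neg (by simp only [List.length_cons] at hin ⊢; omega), if_neg hin]

theorem modfold_length (l : List (Char × Nat)) (j : Nat) (g : List (List Char)) :
    (l.foldl (fun g p => g.modify p.2 (fun row => row.set j p.1)) g).length = g.length := by
  induction l generalizing g with
  | nil => rfl
  | cons p t ih => simp [List.foldl_cons, ih, List.length_modify]

theorem scatterCol_length (j : Nat) (g : List (List Char)) (v : List Char) :
    (scatterCol j g v).length = g.length := modfold_length _ _ _

theorem scatterCol_rowlen (j n : Nat) (v : List Char) (g : List (List Char))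
    (h : ∀ (i : Nat) (row : List Char), g[i]? = some row → row.length = n) :
    ∀ (i : Nat) (row : List Char), (scatterCol j g v)[i]? = some row → row.length = n := by
  intro i row hrow
  unfold scatterCol at hrow
  rw [scatterCol_getElem?] at hrow
  split_ifs at hrow
  · cases hg : g[i]? with
    | none => rw [hg] at hrow; simp at hrow
    | some r =>
        rw [hg] at hrow
        simp only [Option.map_some, Option.some_inj] at hrow
        rw [← hrow, List.length_set]
        exact h i r hg
  · exact h i row hrow

def gridGet (g : List (List Char)) (i j : Nat) : Option Char :=
  g[i]?.bind (fun row => row[j]?)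

theorem gridGet_scatterCol_ne (q : Nat) (g : List (List Char)) (v : List Char) (i j : Nat)
    (hne : j ≠ q) : gridGet (scatterCol q g v) i j = gridGet g i j := by
  have hqj : q ≠ j := fun h => hne h.symm
  unfold gridGet scatterCol
  rw [scatterCol_getElem?]
  split_ifs
  · cases hg : g[i]? with
    | none => simp
    | some r => simp [hqj]
  · rfl

theorem gridGet_scatterCol_eq (q n : Nat) (g : List (List Char)) (v : List Char) (i : Nat)
    (hqn : q < n) (h : ∀ (i : Nat) (row : List Char), g[i]? = some row → row.length = n) :
    gridGet (scatterCol q g v) i q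
      = if i < v.length ∧ i < g.length then some (v.getD i ' ') else gridGet g i q := by
  unfold gridGet scatterCol
  rw [scatterCol_getElem?]
  by_cases hiv : i < v.length
  · rw [if_pos (by omega)]
    by_cases hig : i < g.length
    · have hrg : g[i]? = some g[i] := List.getElem?_eq_some_iff.mpr ⟨hig, rfl⟩
      rw [hrg, if_pos ⟨hiv, hig⟩]
      have hlen : q < (g[i]).length := by rw [h i g[i] hrg]; exact hqn
      simp [hlen]
    · rw [List.getElem?_eq_none (by omega), if_neg (by omega)]
      simp
  · rw [if_neg (by omega), if_neg (by omega)]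

theorem grid_get_fold (n : Nat) (cols : List (List Char)) : ∀ (q : Nat) (g : List (List Char)) (i j : Nat),
    q + cols.length ≤ n → (∀ (i : Nat) (row : List Char), g[i]? = some row → row.length = n) →
    gridGet ((cols.zipIdx q).foldl (fun g p => scatterCol p.2 g p.1) g) i j
      = if q ≤ j ∧ j < q + cols.length ∧ i < (cols.getD (j - q) []).length then
          (if i < g.length then some ((cols.getD (j - q) []).getD i ' ') else none)
        else gridGet g i j := by
  induction cols with
  | nil =>
      intro q g i j _ _
      rw [if_neg (by simp only [List.length_nil]; omega)]
      rfl
  | cons v cst ih =>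
      intro q g i j hq hrow
      have hq' : q + cst.length + 1 ≤ n := by simp only [List.length_cons] at hq; omega
      rw [List.zipIdx_cons, List.foldl_cons]
      have hrow' := scatterCol_rowlen q n v g hrow
      have hlen' : (scatterCol q g v).length = g.length := scatterCol_length _ _ _
      rw [ih (q + 1) (scatterCol q g v) i j (by omega) hrow', hlen']
      by_cases hjq : j = q
      · subst hjq
        rw [if_neg (by omega)]
        rw [gridGet_scatterCol_eq j n g v i (by omega) hrow]
        simp only [Nat.sub_self, List.getD_cons_zero, List.length_cons]
        split_ifs <;>
          first
            | rfl
            | omega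
            | (unfold gridGet; rw [List.getElem?_eq_none (by omega)]; rfl)
      · rw [gridGet_scatterCol_ne q g v i j hjq]
        by_cases hq2 : q ≤ j
        · have hsub : j - q = (j - (q + 1)) + 1 := by omega
          rw [hsub]
          simp only [List.getD_cons_succ, List.length_cons]
          split_ifs <;> first | rfl | omega
        · rw [if_neg (by omega), if_neg (by omega)]

theorem fold_scatter_length (l : List (List Char × Nat)) (g : List (List Char)) :
    (l.foldl (fun g p => scatterCol p.2 g p.1) g).length = g.length := by
  induction l generalizing g with
  | nil => rfl
  | cons p t ih =>
      rw [List.foldl_cons, ih]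
      exact scatterCol_length _ _ _

theorem grid_eq (vals : List (List Char)) (L : Nat) :
    vals.zipIdx.foldl (fun g p => scatterCol p.2 g p.1)
        (List.replicate L (List.replicate vals.length ' '))
      = (List.range L).map (fun i => vals.map (fun v => v.getD i ' ')) := by
  have hrow0 : ∀ (i : Nat) (row : List Char),
      (List.replicate L (List.replicate vals.length ' '))[i]? = some row → row.length = vals.length := by
    intro i row h
    rw [List.getElem?_replicate] at h
    split_ifs at h
    simp [← Option.some_inj.mp h]
  have hlen : (vals.zipIdx.foldl (fun g p => scatterCol p.2 g p.1)
      (List.replicate L (List.replicate vals.length ' '))).length = L := by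
    rw [fold_scatter_length, List.length_replicate]
  apply List.ext_getElem?
  intro i
  by_cases hiL : i < L
  · have hL : (vals.zipIdx.foldl (fun g p => scatterCol p.2 g p.1)
        (List.replicate L (List.replicate vals.length ' ')))[i]?
        = some (vals.zipIdx.foldl (fun g p => scatterCol p.2 g p.1)
            (List.replicate L (List.replicate vals.length ' ')))[i] :=
      List.getElem?_eq_some_iff.mpr ⟨by omega, rfl⟩
    rw [hL, List.getElem?_map, List.getElem?_range hiL]
    simp only [Option.map_some, Option.some_inj]
    apply List.ext_getElem?
    intro j
    have hmain := grid_get_fold vals.length vals 0 (List.replicate L (List.replicate vals.length ' '))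
      i j (by simp) hrow0
    have hchar : gridGet (vals.zipIdx.foldl (fun g p => scatterCol p.2 g p.1)
        (List.replicate L (List.replicate vals.length ' '))) i j
        = (vals.zipIdx.foldl (fun g p => scatterCol p.2 g p.1)
            (List.replicate L (List.replicate vals.length ' ')))[i][j]? := by
      unfold gridGet
      rw [hL]
      rfl
    rw [← hchar, hmain, List.getElem?_map, List.length_replicate]
    by_cases hjn : j < vals.length
    · have hvj : vals[j]? = some vals[j] := List.getElem?_eq_some_iff.mpr ⟨hjn, rfl⟩
      have hvd : vals.getD (j - 0) [] = vals[j] := by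
        rw [Nat.sub_zero, List.getD_eq_getElem?_getD, hvj]
        rfl
      rw [hvj, hvd]
      simp only [Option.map_some]
      by_cases hij : i < vals[j].length
      · rw [if_pos ⟨by omega, by omega, hij⟩, if_pos hiL]
      · rw [if_neg (by omega)]
        unfold gridGet
        rw [List.getElem?_replicate, if_pos hiL]
        simp only [Option.bind_some, List.getElem?_replicate, if_pos hjn]
        rw [List.getD_eq_getElem?_getD, List.getElem?_eq_none (by omega)]
        rfl
    · rw [List.getElem?_eq_none (by omega)]
      simp only [Option.map_none]
      rw [if_neg (by omega)]
      unfold gridGet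
      rw [List.getElem?_replicate, if_pos hiL]
      simp only [Option.bind_some, List.getElem?_replicate, if_neg hjn]
  · rw [List.getElem?_eq_none (by omega), List.getElem?_eq_none (by rw [List.length_map, List.length_range]; omega)]

-- the shared core: both loop bodies over the same list of values
theorem core_eq (vals : List (List Char)) :
    (PySem.List.pyRange 0 (vals.foldl (fun l v => if (v.length : Int) > l then (v.length : Int) else l) 0) 1).foldl
        (fun acc i => (vals.foldl (fun acc v => acc ++ [(PySem.List.pyGet? v i).getD ' ']) acc) ++ ['\n']) []
      = ((vals.zipIdx.foldl (fun g p => scatterCol p.2 g p.1)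
            (List.replicate (vals.foldl (fun m v => max m v.length) 0) (List.replicate vals.length ' '))).map
          (fun row => row ++ ['\n'])).flatten := by
  have hlong : vals.foldl (fun l v => if (v.length : Int) > l then (v.length : Int) else l) 0
      = ((vals.foldl (fun m v => max m v.length) 0 : Nat) : Int) := by
    simpa using fold_longest_eq vals 0
  rw [hlong, foldl_rows_eq, grid_eq vals, PySem.List.pyRange_one, List.nil_append, List.flatMap_def]
  simp only [Int.sub_zero, Int.toNat_natCast, List.map_map]
  refine congrArg List.flatten (List.map_congr_left fun k hk => ?_)
  simp only [Function.comp, zero_add]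
  refine congrArg (· ++ ['\n']) ?_
  refine List.map_congr_left (fun v hv => ?_)
  rw [PySem.List.pyGet?_natCast, List.getD_eq_getElem?_getD]

-- ===== VERDICT (by name: the statement is the Claim_ definition above) =====
theorem calculate_alpha_text_key_spec : Claim_equal_calculate_alpha_text_key := by
  intro d _
  exact congrArg String.ofList (core_eq (d.map (fun p => p.2.toList)))
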